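-- pv_equiv track=rewrite | github.com/Intruder9211/DSA-2025 | DAY-04/02_Optimal_Energy_Zone_Allocation.py | countValidPartitions
-- ===== SOURCE A (Python) =====
-- def countValidPartitions(E, N):
--     prefix = [0] * (N + 1)
--     for i in range(N):
--         prefix[i + 1] = prefix[i] + E[i]
--
--     count = 0
--
--     for length in range(1, (N // 2) + 1):
--         len_alpha = length
--         len_gamma = length
--         len_beta = N - len_alpha - len_gamma
--
--         if len_beta < 1:
--             continue
--
--         sum_alpha = prefix[len_alpha]
--         sum_beta = prefix[len_alpha + len_beta] - prefix[len_alpha]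
--         sum_gamma = prefix[N] - prefix[N - len_gamma]
--
--         if sum_alpha + sum_gamma > sum_beta:
--             count += 1
--
--     return count
-- ===== SOURCE B (Python) =====
-- def countValidPartitions(E, N):
--     total = 0
--     for i in range(N):
--         total += E[i]
--     count = 0
--     sum_alpha = 0
--     sum_gamma = 0
--     for length in range(1, N // 2 + 1):
--         sum_alpha += E[length - 1]
--         sum_gamma += E[N - length]
--         if N - 2 * length < 1:
--             continue
--         if sum_alpha + sum_gamma > total - sum_alpha - sum_gamma:
--             count += 1
--     return count
-- ===== Notes on version B (the rewrite author's own statement) =====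
-- stated objective: simpler
-- what changed: Replaces the precomputed prefix-sum array with a single fused pass that maintains running front (sum_alpha) and back (sum_gamma) sums plus the precomputed total, deriving the middle sum by subtraction.
import Mathlib
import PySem

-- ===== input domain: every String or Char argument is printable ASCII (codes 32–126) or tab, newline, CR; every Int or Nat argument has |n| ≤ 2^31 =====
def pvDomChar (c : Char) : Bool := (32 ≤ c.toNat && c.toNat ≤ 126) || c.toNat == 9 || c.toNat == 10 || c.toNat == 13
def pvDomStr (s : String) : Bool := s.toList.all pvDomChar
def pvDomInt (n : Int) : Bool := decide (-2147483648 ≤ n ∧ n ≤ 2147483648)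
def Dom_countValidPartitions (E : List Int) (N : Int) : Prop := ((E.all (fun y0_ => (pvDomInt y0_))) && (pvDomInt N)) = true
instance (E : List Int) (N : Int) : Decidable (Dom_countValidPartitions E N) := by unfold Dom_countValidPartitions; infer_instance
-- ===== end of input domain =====

-- B replaces A's precomputed prefix-sum array by one fused pass with running front/back sums and a total (simpler, O(1) extra space); same return values.

-- ===== PORT A =====
def countValidPartitions (E : List Int) (N : Int) : Int :=
  let pfx := (PySem.List.pyRange 0 N 1).foldl
    (fun p i => PySem.List.pySetD p (i + 1) (PySem.List.pyGetD p i 0 + PySem.List.pyGetD E i 0))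
    (List.replicate (N + 1).toNat (0 : Int))
  (PySem.List.pyRange 1 (PySem.Int.floordiv N 2 + 1) 1).foldl
    (fun count length =>
      let lenBeta := N - length - length
      if lenBeta < 1 then count
      else
        let sumAlpha := PySem.List.pyGetD pfx length 0
        let sumBeta := PySem.List.pyGetD pfx (length + lenBeta) 0 - PySem.List.pyGetD pfx length 0
        let sumGamma := PySem.List.pyGetD pfx N 0 - PySem.List.pyGetD pfx (N - length) 0
        if sumAlpha + sumGamma > sumBeta then count + 1 else count)
    0

-- ===== PORT B =====
def countValidPartitions_alt (E : List Int) (N : Int) : Int :=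
  let total := (PySem.List.pyRange 0 N 1).foldl (fun t i => t + PySem.List.pyGetD E i 0) 0
  let st := (PySem.List.pyRange 1 (PySem.Int.floordiv N 2 + 1) 1).foldl
    (fun (s : Int × Int × Int) length =>
      let sumAlpha := s.2.1 + PySem.List.pyGetD E (length - 1) 0
      let sumGamma := s.2.2 + PySem.List.pyGetD E (N - length) 0
      if N - 2 * length < 1 then (s.1, sumAlpha, sumGamma)
      else if sumAlpha + sumGamma > total - sumAlpha - sumGamma then (s.1 + 1, sumAlpha, sumGamma)
      else (s.1, sumAlpha, sumGamma))
    (0, 0, 0)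
  st.1

-- ===== PRECONDITION & SPEC =====
-- Pre_ excludes exactly the inputs where Python A raises IndexError: N larger than len(E).
def Pre_countValidPartitions (E : List Int) (N : Int) : Prop := N ≤ (E.length : Int)
instance (E : List Int) (N : Int) : Decidable (Pre_countValidPartitions E N) := by unfold Pre_countValidPartitions; infer_instance
def pvWitness_countValidPartitions : List Int × Int := ([1, 2, 3, 4, 5], 5)

def Spec_countValidPartitions (E : List Int) (N : Int) (out : Int) : Prop := out = countValidPartitions_alt E N
instance (E : List Int) (N : Int) (out : Int) : Decidable (Spec_countValidPartitions E N out) := by unfold Spec_countValidPartitions; infer_instance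

-- ===== CLAIM (what is proved, stated in full; the proofs are below) =====
def Claim_equal_countValidPartitions : Prop := ∀ (E : List Int) (N : Int), Dom_countValidPartitions E N → Pre_countValidPartitions E N → Spec_countValidPartitions E N (countValidPartitions E N)

-- ===== LEMMAS AND PROOFS =====

/-- Sum of the first `k` elements (clamped), the common mathematical core. -/
def cvpS (E : List Int) (k : Int) : Int := (E.take k.toNat).sum

/-- The common counting step both loops reduce to. -/
def cvpStep (E : List Int) (N : Int) (c l : Int) : Int :=
  if N - l - l < 1 then c
  else if cvpS E l + (cvpS E N - cvpS E (N - l)) > cvpS E (N - l) - cvpS E l then c + 1 else c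

theorem cvpS_zero (E : List Int) : cvpS E 0 = 0 := rfl

theorem cvpS_succ (E : List Int) (k : Int) (h0 : 0 ≤ k) (hk : k < (E.length : Int)) :
    cvpS E (k + 1) = cvpS E k + PySem.List.pyGetD E k 0 := by
  have hkn : k.toNat < E.length := by omega
  have h1 : (k + 1).toNat = k.toNat + 1 := by omega
  rw [PySem.List.pyGetD_eq_getElem E 0 h0 hk]
  simp [cvpS, h1, List.sum_take_succ E k.toNat hkn]

theorem cvp_total (E : List Int) (N : Int) (hE : N ≤ (E.length : Int)) :
    ∀ m : Nat, (m : Int) ≤ N →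
      (PySem.List.pyRange 0 (m : Int) 1).foldl (fun t i => t + PySem.List.pyGetD E i 0) 0
        = cvpS E m := by
  intro m
  induction m with
  | zero => intro _; simp [PySem.List.pyRange_one_eq_nil, cvpS_zero]
  | succ m ih =>
    intro hm
    have hsplit : PySem.List.pyRange 0 ((m : Int) + 1) 1
        = PySem.List.pyRange 0 (m : Int) 1 ++ [(m : Int)] :=
      PySem.List.pyRange_one_succ_right (by omega)
    have hm' : (m : Int) ≤ N := by omega
    push_cast
    rw [hsplit, List.foldl_append, ih hm']
    simp only [List.foldl_cons, List.foldl_nil]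
    rw [cvpS_succ E m (by omega) (by omega)]

/-- Invariant of A's prefix-building loop. -/
theorem cvp_pfx (E : List Int) (N : Int) (hE : N ≤ (E.length : Int)) (hN : 0 ≤ N) :
    ∀ m : Nat, (m : Int) ≤ N →
      let p := (PySem.List.pyRange 0 (m : Int) 1).foldl
        (fun p i => PySem.List.pySetD p (i + 1) (PySem.List.pyGetD p i 0 + PySem.List.pyGetD E i 0))
        (List.replicate (N + 1).toNat (0 : Int))
      p.length = (N + 1).toNat ∧ ∀ k : Int, 0 ≤ k → k ≤ (m : Int) → PySem.List.pyGetD p k 0 = cvpS E k := by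
  intro m
  induction m with
  | zero =>
    intro _
    refine ⟨by simp [PySem.List.pyRange_one_eq_nil], ?_⟩
    intro k hk0 hk1
    have hk : k = 0 := by omega
    subst hk
    simp [PySem.List.pyRange_one_eq_nil, PySem.List.pyGetD_zero, cvpS_zero, List.getD]
  | succ m ih =>
    intro hm
    have hm' : (m : Int) ≤ N := by omega
    obtain ⟨hlen, hget⟩ := ih hm'
    have hsplit : PySem.List.pyRange 0 ((m : Int) + 1) 1
        = PySem.List.pyRange 0 (m : Int) 1 ++ [(m : Int)] :=
      PySem.List.pyRange_one_succ_right (by omega)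
    push_cast
    rw [hsplit, List.foldl_append]
    simp only [List.foldl_cons, List.foldl_nil]
    set p := (PySem.List.pyRange 0 (m : Int) 1).foldl
        (fun p i => PySem.List.pySetD p (i + 1) (PySem.List.pyGetD p i 0 + PySem.List.pyGetD E i 0))
        (List.replicate (N + 1).toNat (0 : Int)) with hp
    have hcast : ((m : Int) + 1) = ((m + 1 : Nat) : Int) := by push_cast; ring
    have hidx : (m + 1 : Nat) < p.length := by omega
    constructor
    · rw [hcast, PySem.List.pySetD_natCast, List.length_set]
      exact hlen
    · intro k hk0 hk1
      have hk' : k = ((k.toNat : Nat) : Int) := by omega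
      rw [hk', hcast, PySem.List.pyGetD_pySetD_natCast p (m + 1) k.toNat _ 0 hidx]
      by_cases hk : k.toNat = m + 1
      · rw [if_pos hk, hk]
        push_cast
        rw [cvpS_succ E m (by omega) (by omega), hget m (by omega) le_rfl]
      · rw [if_neg hk]
        exact hget ((k.toNat : Nat) : Int) (by omega) (by omega)

/-- A's counting loop, over any list `p` that agrees with the prefix sums, equals the common step. -/
theorem cvp_count (E : List Int) (N : Int) (p : List Int) (hN : 2 ≤ N)
    (hp : ∀ k : Int, 0 ≤ k → k ≤ N → PySem.List.pyGetD p k 0 = cvpS E k) :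
    (PySem.List.pyRange 1 (PySem.Int.floordiv N 2 + 1) 1).foldl
      (fun count length =>
        let lenBeta := N - length - length
        if lenBeta < 1 then count
        else
          let sumAlpha := PySem.List.pyGetD p length 0
          let sumBeta := PySem.List.pyGetD p (length + lenBeta) 0 - PySem.List.pyGetD p length 0
          let sumGamma := PySem.List.pyGetD p N 0 - PySem.List.pyGetD p (N - length) 0
          if sumAlpha + sumGamma > sumBeta then count + 1 else count)
      0
    = (PySem.List.pyRange 1 (PySem.Int.floordiv N 2 + 1) 1).foldl (cvpStep E N) 0 := by
  have hfd : PySem.Int.floordiv N 2 = N / 2 := PySem.Int.floordiv_eq_ediv_of_pos (by omega)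
  refine PySem.List.foldl_congr_mem _ _ _ _ ?_
  intro acc l hl
  rw [PySem.List.mem_pyRange_one] at hl
  have hl2 : l ≤ N / 2 := by omega
  have hlN : 2 * l ≤ N := by omega
  simp only [cvpStep]
  by_cases hb : N - l - l < 1
  · rw [if_pos hb, if_pos hb]
  · rw [if_neg hb, if_neg hb]
    have e2 : l + (N - l - l) = N - l := by ring
    rw [e2, hp l (by omega) (by omega), hp (N - l) (by omega) (by omega), hp N (by omega) le_rfl]

/-- Invariant of B's fused loop: count matches the common step, the running
    sums are the front sum and the back sum. -/
theorem cvp_B (E : List Int) (N : Int) (hE : N ≤ (E.length : Int)) (hN : 2 ≤ N) :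
    ∀ m : Nat, (m : Int) ≤ N / 2 →
      (PySem.List.pyRange 1 ((m : Int) + 1) 1).foldl
        (fun (s : Int × Int × Int) length =>
          let sumAlpha := s.2.1 + PySem.List.pyGetD E (length - 1) 0
          let sumGamma := s.2.2 + PySem.List.pyGetD E (N - length) 0
          if N - 2 * length < 1 then (s.1, sumAlpha, sumGamma)
          else if sumAlpha + sumGamma > cvpS E N - sumAlpha - sumGamma then (s.1 + 1, sumAlpha, sumGamma)
          else (s.1, sumAlpha, sumGamma))
        (0, 0, 0)
      = ((PySem.List.pyRange 1 ((m : Int) + 1) 1).foldl (cvpStep E N) 0,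
         cvpS E m, cvpS E N - cvpS E (N - m)) := by
  intro m
  induction m with
  | zero =>
    intro _
    simp [PySem.List.pyRange_one_eq_nil, cvpS_zero]
  | succ m ih =>
    intro hm
    have hm' : (m : Int) ≤ N / 2 := by omega
    have hsplit : PySem.List.pyRange 1 ((m : Int) + 1 + 1) 1
        = PySem.List.pyRange 1 ((m : Int) + 1) 1 ++ [(m : Int) + 1] :=
      PySem.List.pyRange_one_succ_right (by omega)
    push_cast
    rw [hsplit, List.foldl_append, List.foldl_append, ih hm']
    simp only [List.foldl_cons, List.foldl_nil]
    have hsa : cvpS E m + PySem.List.pyGetD E ((m : Int) + 1 - 1) 0 = cvpS E ((m : Int) + 1) := by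
      have h0 : (m : Int) + 1 - 1 = (m : Int) := by ring
      rw [h0, cvpS_succ E m (by omega) (by omega)]
    have hsg : cvpS E N - cvpS E (N - m) + PySem.List.pyGetD E (N - ((m : Int) + 1)) 0
        = cvpS E N - cvpS E (N - ((m : Int) + 1)) := by
      have h1 : N - (m : Int) = (N - ((m : Int) + 1)) + 1 := by ring
      rw [h1, cvpS_succ E (N - ((m : Int) + 1)) (by omega) (by omega)]
      ring
    simp only [hsa, hsg]
    unfold cvpStep
    have hgu : (N - 2 * ((m : Int) + 1) < 1) = (N - ((m : Int) + 1) - ((m : Int) + 1) < 1) := by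
      simp only [eq_iff_iff]; omega
    have hcond : (cvpS E ((m : Int) + 1) + (cvpS E N - cvpS E (N - ((m : Int) + 1)))
          > cvpS E N - cvpS E ((m : Int) + 1) - (cvpS E N - cvpS E (N - ((m : Int) + 1))))
        = (cvpS E ((m : Int) + 1) + (cvpS E N - cvpS E (N - ((m : Int) + 1)))
          > cvpS E (N - ((m : Int) + 1)) - cvpS E ((m : Int) + 1)) := by
      simp only [eq_iff_iff]; omega
    simp only [hgu, hcond]
    split_ifs <;> rfl

-- ===== VERDICT (by name: the statement is the Claim_ definition above) =====
theorem countValidPartitions_spec : Claim_equal_countValidPartitions := by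
  intro E N _ hPre
  unfold Spec_countValidPartitions
  by_cases hN : 2 ≤ N
  · have hfd : PySem.Int.floordiv N 2 = N / 2 := PySem.Int.floordiv_eq_ediv_of_pos (by omega)
    have hNnn : (0 : Int) ≤ N := by omega
    obtain ⟨hlen, hget⟩ := cvp_pfx E N hPre hNnn N.toNat (by omega)
    have hNn : ((N.toNat : Nat) : Int) = N := by omega
    rw [hNn] at hget
    have hA : countValidPartitions E N
        = (PySem.List.pyRange 1 (PySem.Int.floordiv N 2 + 1) 1).foldl (cvpStep E N) 0 := by
      unfold countValidPartitions
      exact cvp_count E N _ hN hget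
    have htot := cvp_total E N hPre N.toNat (by omega)
    rw [hNn] at htot
    have hcast : N / 2 = (((N / 2).toNat : Nat) : Int) := by omega
    have hB := cvp_B E N hPre hN (N / 2).toNat (by omega)
    rw [hA]
    unfold countValidPartitions_alt
    simp only [htot, hfd]
    rw [hcast, hB]
  · have hfdle : PySem.Int.floordiv N 2 ≤ 0 := by
      rcases lt_or_ge N 0 with h | h
      · have hdm := PySem.Int.floordiv_mul_add_mod N 2
        have h1 : 0 ≤ PySem.Int.mod N 2 := PySem.Int.mod_nonneg N (by omega)
        have h2 : PySem.Int.mod N 2 < 2 := PySem.Int.mod_lt N (by omega)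
        omega
      · rw [PySem.Int.floordiv_eq_ediv_of_pos (by omega)]; omega
    have hnil : PySem.List.pyRange 1 (PySem.Int.floordiv N 2 + 1) 1 = [] :=
      PySem.List.pyRange_one_eq_nil (by omega)
    unfold countValidPartitions countValidPartitions_alt
    rw [hnil]
    simp
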